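-- pv_equiv track=rewrite | github.com/anthonyriachy/foundations-cs-python | midterm/main.py | range_of_same_date
-- ===== SOURCE A (Python) =====
-- def range_of_same_date(new_list):
--     indices=[]
--     i=0
--     while i < len(new_list): #for each date in the list we check if there is consecutive dates equal to it
--         starting_index=0
--         ending_index=0 #these are for the parts that are equal dates
--         j=i+1
--
--         while(j<len(new_list) and new_list[i]['event_date'] == new_list[j]['event_date']): #while the event date are the same (because sorted they will be next to each other) we keep looping
--
--             starting_index=i
--             ending_index=j #when the loop stops we will have the correct ending date
--
--
--             j+=1
--         i=j # because j is the ending_index of the tickets with same date (we don't want to check them again)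
--
--         indices.append({'starting_index':starting_index,'ending_index':ending_index}) #dictionaries that have the starting and ending index of dates that are the same
--     return(indices)
-- ===== SOURCE B (Python) =====
-- def duplicate_span(start, end):
--     """Index span of a duplicated run of dates; a run of a single date has no
--     duplicates, hence the empty span {'starting_index': 0, 'ending_index': 0}."""
--     if end > start:
--         return {'starting_index': start, 'ending_index': end}
--     return {'starting_index': 0, 'ending_index': 0}
--
-- def range_of_same_date(new_list):
--     """One flat pass over adjacent pairs of the (sorted) events: a run of equal
--     'event_date' values ends wherever the date changes; report each run's
--     duplicate span."""
--     indices = []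
--     start = 0
--     for pos in range(1, len(new_list)):
--         if new_list[pos]['event_date'] != new_list[pos - 1]['event_date']:
--             indices.append(duplicate_span(start, pos - 1))
--             start = pos
--     if new_list:
--         indices.append(duplicate_span(start, len(new_list) - 1))
--     return indices
-- ===== Notes on version B (the rewrite author's own statement) =====
-- stated objective: simpler
-- what changed: Replaces A's nested index-jumping while loops with one flat pass over adjacent index pairs that carries the current run's start index and a small helper rendering each run's duplicate span ({0,0} for an unrepeated date); Pre_ excludes lists of length >= 2 in which some element lacks the key 'event_date', on which both versions raise KeyError.
import Mathlib
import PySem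

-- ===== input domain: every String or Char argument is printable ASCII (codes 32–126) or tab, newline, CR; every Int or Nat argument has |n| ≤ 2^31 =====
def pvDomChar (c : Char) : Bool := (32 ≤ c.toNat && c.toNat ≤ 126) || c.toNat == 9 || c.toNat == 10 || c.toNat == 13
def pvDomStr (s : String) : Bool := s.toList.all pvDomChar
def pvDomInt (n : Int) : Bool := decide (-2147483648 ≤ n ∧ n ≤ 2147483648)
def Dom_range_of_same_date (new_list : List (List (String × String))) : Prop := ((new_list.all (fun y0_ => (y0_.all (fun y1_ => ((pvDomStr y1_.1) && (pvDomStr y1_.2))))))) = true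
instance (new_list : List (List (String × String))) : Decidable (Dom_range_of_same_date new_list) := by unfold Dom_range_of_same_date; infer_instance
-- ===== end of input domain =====

-- B replaces A's nested index-jumping while loops by one flat pass over adjacent index pairs,
-- carrying the open run's start index and rendering each run's duplicate span via a helper
-- (objective: simpler; same O(n) cost).

-- ===== PORT A =====
-- d['event_date'] (first match in the association list); the .getD "" default is never taken
-- under Pre_ (key present), where Python would raise KeyError
def pvGetDate (d : List (String × String)) : String := (List.lookup "event_date" d).getD ""

-- inner while loop of A; the fuel argument (nl.length at the call site) only makes the
-- recursion structural: it never runs out before the loop condition fails.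
-- Indices i, j are always in range where the branch reads them (nl.getD _ [] is exact there).
def pvInnerA (nl : List (List (String × String))) (i : Nat) :
    Nat → Nat → Int → Int → Int × Int × Nat
  | 0, j, s, e => (s, e, j)
  | fuel + 1, j, s, e =>
    if j < nl.length ∧ pvGetDate (nl.getD i []) == pvGetDate (nl.getD j []) then
      pvInnerA nl i fuel (j + 1) (i : Int) (j : Int)
    else (s, e, j)

-- outer while loop of A (same fuel convention)
def pvOuterA (nl : List (List (String × String))) :
    Nat → Nat → List (List (String × Int)) → List (List (String × Int))
  | 0, _, acc => acc
  | fuel + 1, i, acc =>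
    if i < nl.length then
      let r := pvInnerA nl i nl.length (i + 1) 0 0
      pvOuterA nl fuel r.2.2 (acc ++ [[("starting_index", r.1), ("ending_index", r.2.1)]])
    else acc

def range_of_same_date (new_list : List (List (String × String))) : List (List (String × Int)) :=
  pvOuterA new_list new_list.length 0 []

-- ===== PORT B =====
-- duplicate_span of Source B
def pvSpanB (start e : Nat) : List (String × Int) :=
  if e > start then [("starting_index", (start : Int)), ("ending_index", (e : Int))]
  else [("starting_index", (0 : Int)), ("ending_index", (0 : Int))]

-- the loop body of Source B at index pos, on state (indices, start); indices pos, pos-1 are always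
-- in range where read (nl.getD _ [] is exact there, as in port A)
def pvStepB (nl : List (List (String × String))) (st : List (List (String × Int)) × Nat)
    (pos : Nat) : List (List (String × Int)) × Nat :=
  if pvGetDate (nl.getD pos []) ≠ pvGetDate (nl.getD (pos - 1) []) then
    (st.1 ++ [pvSpanB st.2 (pos - 1)], pos)
  else st

-- range(1, len(new_list)) is List.range' 1 (len - 1) (empty for len = 0 as in Python)
def range_of_same_date_alt (new_list : List (List (String × String))) : List (List (String × Int)) :=
  let st := (List.range' 1 (new_list.length - 1)).foldl (pvStepB new_list) ([], 0)
  if new_list ≠ [] then st.1 ++ [pvSpanB st.2 (new_list.length - 1)] else st.1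

-- ===== PRECONDITION & SPEC =====
-- Pre_ excludes lists of length ≥ 2 in which some element lacks the key 'event_date':
-- Python A raises KeyError there (it reads every element's 'event_date').
def Pre_range_of_same_date (new_list : List (List (String × String))) : Prop :=
  new_list.length ≤ 1 ∨ ∀ d ∈ new_list, (List.lookup "event_date" d).isSome = true

instance (new_list : List (List (String × String))) : Decidable (Pre_range_of_same_date new_list) := by
  unfold Pre_range_of_same_date; infer_instance

def pvWitness_range_of_same_date : (List (List (String × String))) :=
  [[("event_date", "a")], [("event_date", "a")], [("event_date", "b")]]

def Spec_range_of_same_date (new_list : List (List (String × String))) (out : List (List (String × Int))) : Prop := out = range_of_same_date_alt new_list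
instance (new_list : List (List (String × String))) (out : List (List (String × Int))) : Decidable (Spec_range_of_same_date new_list out) := by unfold Spec_range_of_same_date; infer_instance

-- ===== CLAIM (what is proved, stated in full; the proofs are below) =====
def Claim_equal_range_of_same_date : Prop := ∀ (new_list : List (List (String × String))), Dom_range_of_same_date new_list → Pre_range_of_same_date new_list → Spec_range_of_same_date new_list (range_of_same_date new_list)

-- ===== LEMMAS AND PROOFS =====

-- A's rendering of one group (placeholder (0,0) for a singleton group)
def pvMkA (s e : Nat) : List (String × Int) :=
  if s == e then [("starting_index", (0 : Int)), ("ending_index", (0 : Int))]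
  else [("starting_index", (s : Int)), ("ending_index", (e : Int))]

-- length of the initial run of key k
def pvRunLen {α : Type} [DecidableEq α] (k : α) : List α → Nat
  | [] => 0
  | x :: xs => if x = k then pvRunLen k xs + 1 else 0

-- common specification: the groups of the key list rendered by mk, starting at absolute index i
def pvGrpW {α : Type} [DecidableEq α] (mk : Nat → Nat → List (String × Int)) : List α → Nat → List (List (String × Int))
  | [], _ => []
  | x :: xs, i =>
    mk i (i + pvRunLen x xs) :: pvGrpW mk (xs.drop (pvRunLen x xs)) (i + pvRunLen x xs + 1)
termination_by l => l.length
decreasing_by simp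

theorem pvGetDate_getD (nl : List (List (String × String))) (j : Nat) :
    pvGetDate (nl.getD j []) = (nl.map pvGetDate).getD j "" := by
  rcases h : nl[j]? with _ | a
  · simp [List.getD, h, pvGetDate]
  · simp [List.getD, h]

theorem pvInnerA_spec (nl : List (List (String × String))) (i : Nat) :
    ∀ (fuel : Nat) (tail : List String) (j : Nat) (s e : Int),
      (nl.map pvGetDate).drop j = tail → tail.length < fuel →
      pvInnerA nl i fuel j s e =
        (if pvRunLen (pvGetDate (nl.getD i [])) tail = 0 then (s, e, j)
         else ((i : Int), ((j + pvRunLen (pvGetDate (nl.getD i [])) tail - 1 : Nat) : Int),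
               j + pvRunLen (pvGetDate (nl.getD i [])) tail)) := by
  intro fuel
  induction fuel with
  | zero => intro tail j s e _ hf; omega
  | succ fuel ihf =>
    intro tail j s e h hf
    cases tail with
    | nil =>
      have hj : (nl.map pvGetDate).length ≤ j := List.drop_eq_nil_iff.mp h
      simp only [List.length_map] at hj
      rw [pvInnerA, if_neg (by rintro ⟨h1, -⟩; omega)]
      simp [pvRunLen]
    | cons x xs =>
      have hlen : j < (nl.map pvGetDate).length := by
        by_contra hc
        rw [List.drop_eq_nil_of_le (by omega)] at h
        simp at h
      have hdec := List.drop_eq_getElem_cons hlen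
      rw [h] at hdec
      injection hdec with hx hxs
      have hkeyj : pvGetDate (nl.getD j []) = x := by
        rw [pvGetDate_getD]
        simp [List.getD, List.getElem?_eq_getElem hlen, hx]
      rw [pvInnerA]
      by_cases hk : pvGetDate (nl.getD i []) = x
      · rw [if_pos ⟨by simpa using hlen, by rw [hk, hkeyj]; simp⟩]
        rw [ihf xs (j + 1) (i : Int) (j : Int) hxs.symm (by simp at hf ⊢; omega)]
        have hr : pvRunLen (pvGetDate (nl.getD i [])) (x :: xs)
            = pvRunLen (pvGetDate (nl.getD i [])) xs + 1 := by
          simp [pvRunLen, hk.symm]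
        rw [hr]
        split_ifs with h0 h1 h1 <;>
          first
          | (exfalso; omega)
          | (simp only [Prod.mk.injEq]; and_intros <;> first | trivial | omega)
      · rw [if_neg (by rintro ⟨-, hb⟩; rw [hkeyj] at hb; exact hk (eq_of_beq hb))]
        have hr : pvRunLen (pvGetDate (nl.getD i [])) (x :: xs) = 0 := by
          simp only [pvRunLen]
          rw [if_neg (fun hx' => hk hx'.symm)]
        rw [hr]
        simp

theorem pvOuterA_spec (nl : List (List (String × String))) :
    ∀ (fuel i : Nat) (acc : List (List (String × Int))), nl.length - i ≤ fuel →
      pvOuterA nl fuel i acc = acc ++ pvGrpW pvMkA ((nl.map pvGetDate).drop i) i := by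
  intro fuel
  induction fuel with
  | zero =>
    intro i acc hle
    rw [pvOuterA]
    rw [List.drop_eq_nil_of_le (by simp; omega)]
    simp [pvGrpW]
  | succ fuel ih =>
    intro i acc hle
    by_cases hi : i < nl.length
    · have hlen : i < (nl.map pvGetDate).length := by simpa using hi
      have hdec := List.drop_eq_getElem_cons hlen
      have hki : pvGetDate (nl.getD i []) = (nl.map pvGetDate)[i] := by
        rw [pvGetDate_getD]
        simp [List.getD, List.getElem?_eq_getElem hlen]
      have hspec := pvInnerA_spec nl i nl.length ((nl.map pvGetDate).drop (i + 1)) (i + 1) 0 0 rfl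
        (by simp; omega)
      rw [hki] at hspec
      rw [pvOuterA, if_pos hi, hdec, pvGrpW]
      generalize hL : pvRunLen ((nl.map pvGetDate)[i]) ((nl.map pvGetDate).drop (i + 1)) = L at hspec ⊢
      have hdd : ((nl.map pvGetDate).drop (i + 1)).drop L = (nl.map pvGetDate).drop (i + 1 + L) := by
        rw [List.drop_drop]
      rcases Nat.eq_zero_or_pos L with h0 | h0
      · rw [if_pos h0] at hspec
        simp only [hspec]
        rw [ih (i + 1) _ (by omega)]
        rw [h0]
        simp [pvMkA]
      · rw [if_neg (by omega)] at hspec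
        simp only [hspec]
        rw [ih (i + 1 + L) _ (by omega), hdd]
        have hmk : pvMkA i (i + L)
            = [("starting_index", (i : Int)), ("ending_index", ((i + 1 + L - 1 : Nat) : Int))] := by
          rw [pvMkA, if_neg (by simp; omega)]
          have h2 : i + 1 + L - 1 = i + L := by omega
          rw [h2]
        have h1 : i + L + 1 = i + 1 + L := by omega
        rw [hmk, h1, List.append_assoc]
        rfl
    · rw [pvOuterA, if_neg hi]
      rw [List.drop_eq_nil_of_le (by simp; omega)]
      simp [pvGrpW]

-- A's entry point as groups
theorem pvA_spec (nl : List (List (String × String))) :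
    range_of_same_date nl = pvGrpW pvMkA (nl.map pvGetDate) 0 := by
  have h := pvOuterA_spec nl nl.length 0 [] (by omega)
  simpa [range_of_same_date] using h

-- the fold of Source B over positions [pos, pos+tail.length): tail is the dates from index pos on,
-- k the date just before it
theorem pvFoldB_spec (nl : List (List (String × String))) :
    ∀ (tail : List String) (pos : Nat) (acc : List (List (String × Int))) (s : Nat),
      1 ≤ pos → (nl.map pvGetDate).drop pos = tail →
      (((List.range' pos tail.length).foldl (pvStepB nl) (acc, s)).1 ++
        [pvSpanB ((List.range' pos tail.length).foldl (pvStepB nl) (acc, s)).2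
                 (pos + tail.length - 1)]) =
      acc ++ (pvSpanB s (pos - 1 + pvRunLen ((nl.map pvGetDate).getD (pos - 1) "") tail) ::
        pvGrpW pvSpanB (tail.drop (pvRunLen ((nl.map pvGetDate).getD (pos - 1) "") tail))
          (pos + pvRunLen ((nl.map pvGetDate).getD (pos - 1) "") tail)) := by
  intro tail
  induction tail with
  | nil =>
    intro pos acc s hpos h
    simp [pvRunLen, pvGrpW]
  | cons x xs ih =>
    intro pos acc s hpos h
    have hlen : pos < (nl.map pvGetDate).length := by
      by_contra hc
      rw [List.drop_eq_nil_of_le (by omega)] at h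
      simp at h
    have hdec := List.drop_eq_getElem_cons hlen
    rw [h] at hdec
    injection hdec with hx hxs
    have hgetp : (nl.map pvGetDate).getD pos "" = x := by
      simp [List.getD, List.getElem?_eq_getElem hlen, hx]
    have hstep : pvStepB nl (acc, s) pos =
        (if x ≠ (nl.map pvGetDate).getD (pos - 1) "" then
          (acc ++ [pvSpanB s (pos - 1)], pos) else (acc, s)) := by
      rw [pvStepB, pvGetDate_getD, pvGetDate_getD, hgetp]
    simp only [List.length_cons]
    rw [List.range'_succ, List.foldl_cons, hstep]
    by_cases hk : x = (nl.map pvGetDate).getD (pos - 1) ""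
    · rw [if_neg (by simpa using hk)]
      have hkey : (nl.map pvGetDate).getD (pos + 1 - 1) "" = (nl.map pvGetDate).getD (pos - 1) "" := by
        rw [show pos + 1 - 1 = pos from by omega, hgetp, hk]
      have := ih (pos + 1) acc s (by omega) hxs.symm
      rw [hkey] at this
      rw [show pos + (xs.length + 1) - 1 = pos + 1 + xs.length - 1 from by omega, this]
      have hr : pvRunLen ((nl.map pvGetDate).getD (pos - 1) "") (x :: xs)
          = pvRunLen ((nl.map pvGetDate).getD (pos - 1) "") xs + 1 := by
        simp [pvRunLen, hk]
      rw [hr]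
      generalize pvRunLen ((nl.map pvGetDate).getD (pos - 1) "") xs = L
      rw [show pos + 1 - 1 + L = pos - 1 + (L + 1) from by omega,
          show pos + 1 + L = pos + (L + 1) from by omega,
          List.drop_succ_cons]
    · rw [if_pos (by simpa using hk)]
      have hkey : (nl.map pvGetDate).getD (pos + 1 - 1) "" = x := by
        rw [show pos + 1 - 1 = pos from by omega, hgetp]
      have := ih (pos + 1) (acc ++ [pvSpanB s (pos - 1)]) pos (by omega) hxs.symm
      rw [hkey] at this
      rw [show pos + (xs.length + 1) - 1 = pos + 1 + xs.length - 1 from by omega, this]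
      have hr : pvRunLen ((nl.map pvGetDate).getD (pos - 1) "") (x :: xs) = 0 := by
        rw [pvRunLen, if_neg hk]
      rw [hr]
      simp only [Nat.add_zero, List.drop_zero]
      rw [pvGrpW]
      simp
      rw [Nat.add_right_comm]

-- B's entry point as groups
theorem pvAltB_spec (nl : List (List (String × String))) :
    range_of_same_date_alt nl = pvGrpW pvSpanB (nl.map pvGetDate) 0 := by
  cases nl with
  | nil => simp [range_of_same_date_alt, pvGrpW]
  | cons d rest =>
    have htail : ((d :: rest).map pvGetDate).drop 1 = rest.map pvGetDate := by simp
    have hkey : ((d :: rest).map pvGetDate).getD 0 "" = pvGetDate d := by simp [List.getD]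
    have hspec := pvFoldB_spec (d :: rest) (rest.map pvGetDate) 1 [] 0 (le_refl 1) htail
    rw [hkey] at hspec
    have hb : range_of_same_date_alt (d :: rest) =
        (((List.range' 1 (rest.map pvGetDate).length).foldl (pvStepB (d :: rest)) ([], 0)).1 ++
          [pvSpanB ((List.range' 1 (rest.map pvGetDate).length).foldl (pvStepB (d :: rest)) ([], 0)).2
                   (1 + (rest.map pvGetDate).length - 1)]) := by
      rw [range_of_same_date_alt]
      rw [if_pos (by simp)]
      simp
    rw [hb, hspec]
    simp only [List.map_cons, List.nil_append]
    rw [pvGrpW]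
    generalize pvRunLen (pvGetDate d) (rest.map pvGetDate) = L
    rw [show (1 : Nat) - 1 + L = 0 + L from by omega,
        show (1 : Nat) + L = 0 + L + 1 from by omega]

-- on a group (s ≤ e always), A's rendering and B's duplicate_span agree
theorem pvMkA_eq_span (i L : Nat) : pvMkA i (i + L) = pvSpanB i (i + L) := by
  rcases Nat.eq_zero_or_pos L with h0 | h0
  · subst h0
    rw [pvMkA, pvSpanB, if_pos (by simp), if_neg (by omega)]
  · rw [pvMkA, pvSpanB, if_neg (by simp; omega), if_pos (by omega)]

theorem pvGrpW_A_eq_B : ∀ (n : Nat) (ds : List String) (i : Nat), ds.length ≤ n →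
    pvGrpW pvMkA ds i = pvGrpW pvSpanB ds i := by
  intro n
  induction n with
  | zero =>
    intro ds i hn
    have : ds = [] := List.eq_nil_of_length_eq_zero (by omega)
    subst this; simp [pvGrpW]
  | succ n ih =>
    intro ds i hn
    cases ds with
    | nil => simp [pvGrpW]
    | cons x xs =>
      rw [pvGrpW, pvGrpW, pvMkA_eq_span,
        ih (xs.drop (pvRunLen x xs)) _ (by simp [List.length_drop] at hn ⊢; omega)]

-- ===== VERDICT (by name: the statement is the Claim_ definition above) =====
theorem range_of_same_date_spec : Claim_equal_range_of_same_date := by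
  intro nl _ _
  unfold Spec_range_of_same_date
  rw [pvA_spec, pvAltB_spec,
    pvGrpW_A_eq_B (nl.map pvGetDate).length _ 0 (le_refl _)]
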